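-- pv_equiv track=rewrite | github.com/Patxi91/CodeWars_Cloud | 6kyu-Spelling Bee-Patxi.py | how_many_bees
-- ===== SOURCE A (Python) =====
-- def how_many_bees(hive):
--     if not hive or not hive[0]:
--         return 0
--
--     def count_bees(direction, row, col):
--         directions = {'UP': (-1, 0), 'DOWN': (1, 0), 'LEFT': (0, -1), 'RIGHT': (0, 1)}
--         dx, dy = directions[direction]
--
--         if 0 <= row + 2 * dx < rows and 0 <= col + 2 * dy < cols:
--             return hive[row][col] == 'b' and hive[row + dx][col + dy] == 'e' and hive[row + 2 * dx][col + 2 * dy] == 'e'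
--         return False
--
--     bee_count = 0
--     rows, cols = len(hive), len(hive[0])
--
--     for i in range(rows):
--         for j in range(cols):
--             if hive[i][j] == 'b':
--                 for direction in ['UP', 'DOWN', 'LEFT', 'RIGHT']:
--                     bee_count += count_bees(direction, i, j)
--
--     return bee_count
-- ===== SOURCE B (Python) =====
-- def how_many_bees(hive):
--     if not hive or not hive[0]:
--         return 0
--     width = len(hive[0])
--     lines = [row[:width] for row in hive] + [''.join(row[j] for row in hive) for j in range(width)]
--     total = 0
--     for line in lines:
--         for i in range(len(line)):
--             if line[i:i+3] in ('bee', 'eeb'):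
--                 total += 1
--     return total
-- ===== Notes on version B (the rewrite author's own statement) =====
-- stated objective: idiomatic
-- what changed: Instead of probing four directions from every 'b' cell with a direction-vector dict and per-probe bounds checks, B builds the row lines (clipped to the grid width len(hive[0])) and the column lines once and counts length-3 windows equal to 'bee' or 'eeb' in each line by a plain substring scan.
import Mathlib
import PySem

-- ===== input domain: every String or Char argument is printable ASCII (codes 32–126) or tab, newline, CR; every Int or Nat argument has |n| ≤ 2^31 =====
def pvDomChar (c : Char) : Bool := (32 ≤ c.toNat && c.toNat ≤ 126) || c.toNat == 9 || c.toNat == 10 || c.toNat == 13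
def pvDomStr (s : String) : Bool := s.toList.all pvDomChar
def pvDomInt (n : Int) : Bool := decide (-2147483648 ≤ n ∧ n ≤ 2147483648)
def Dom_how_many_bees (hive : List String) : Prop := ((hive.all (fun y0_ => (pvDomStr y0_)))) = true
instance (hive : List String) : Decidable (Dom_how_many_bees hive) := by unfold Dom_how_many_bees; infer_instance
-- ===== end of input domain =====

-- B replaces A's per-'b'-cell four-direction probes (direction dict + bounds checks) by building the
-- row and column line strings once and counting 3-char windows equal to "bee"/"eeb" in each line (idiomatic).

-- ===== PORT A =====
-- hive[row][col] == c : exact where both indices are in range (Python raises IndexError otherwise; excluded by Pre_)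
def pvCellB (hive : List String) (i j : Int) (c : Char) : Bool :=
  ((PySem.List.pyGet? hive i).bind (fun s => PySem.Str.pyGet? s j)) == some c

def pvCountBees (hive : List String) (rows cols : Int) (direction : String) (row col : Int) : Bool :=
  let directions : PySem.Dict String (Int × Int) :=
    ((((PySem.Dict.empty).insert "UP" (-1, 0)).insert "DOWN" (1, 0)).insert "LEFT" (0, -1)).insert "RIGHT" (0, 1)
  -- d = directions[direction]: every call site passes a present key, so the KeyError branch is unreachable
  let d := (directions.getD direction (0, 0))
  let dx := d.1
  let dy := d.2
  if 0 ≤ row + 2 * dx ∧ row + 2 * dx < rows ∧ 0 ≤ col + 2 * dy ∧ col + 2 * dy < cols then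
    pvCellB hive row col 'b' && pvCellB hive (row + dx) (col + dy) 'e' &&
      pvCellB hive (row + 2 * dx) (col + 2 * dy) 'e'
  else false

def how_many_bees (hive : List String) : Int :=
  if hive = [] ∨ hive.headD "" = "" then 0
  else
    let rows : Int := hive.length
    let cols : Int := PySem.Str.len (hive.headD "")
    (PySem.List.pyRange 0 rows 1).foldl (fun acc i =>
      (PySem.List.pyRange 0 cols 1).foldl (fun acc2 j =>
        if pvCellB hive i j 'b' then
          (["UP", "DOWN", "LEFT", "RIGHT"]).foldl (fun acc3 dir =>
            acc3 + (if pvCountBees hive rows cols dir i j then 1 else 0)) acc2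
        else acc2) acc) 0

-- ===== PORT B =====
-- lines as List Char (Str slicing bridges to List slicing); row[j] via pyGetD, exact on rectangular grids (Pre_)
def how_many_bees_alt (hive : List String) : Int :=
  if hive = [] ∨ hive.headD "" = "" then 0
  else
    let width : Int := PySem.Str.len (hive.headD "")
    let lines : List (List Char) :=
      hive.map (fun row => PySem.List.slice row.toList none (some width)) ++
        (PySem.List.pyRange 0 width 1).map
          (fun j => hive.map (fun row => PySem.List.pyGetD row.toList j ' '))
    lines.foldl (fun acc line =>
      (PySem.List.pyRange 0 (PySem.Chars.len line) 1).foldl (fun acc2 i =>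
        if PySem.List.slice line (some i) (some (i + 3)) = ['b', 'e', 'e'] ∨
            PySem.List.slice line (some i) (some (i + 3)) = ['e', 'e', 'b'] then acc2 + 1
        else acc2) acc) 0

-- ===== PRECONDITION & SPEC =====
-- Pre_ excludes grids with a row shorter than the first row: A reads hive[i][j] for every j < len(hive[0])
-- and raises IndexError there (B raises on the same inputs, in its column comprehension).
def Pre_how_many_bees (hive : List String) : Prop :=
  ∀ s ∈ hive, (hive.headD "").toList.length ≤ s.toList.length
instance (hive : List String) : Decidable (Pre_how_many_bees hive) := by unfold Pre_how_many_bees; infer_instance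

def pvWitness_how_many_bees : List String := ["bee", "eeb"]

def Spec_how_many_bees (hive : List String) (out : Int) : Prop := out = how_many_bees_alt hive
instance (hive : List String) (out : Int) : Decidable (Spec_how_many_bees hive out) := by unfold Spec_how_many_bees; infer_instance

-- ===== CLAIM (what is proved, stated in full; the proofs are below) =====
def Claim_equal_how_many_bees : Prop := ∀ (hive : List String), Dom_how_many_bees hive → Pre_how_many_bees hive → Spec_how_many_bees hive (how_many_bees hive)


-- ===== LEMMAS AND PROOFS =====

-- indicator: "bee" occupies positions i, i+1, i+2 of l
def pvBeeAt (l : List Char) (i : Nat) : Int :=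
  if i + 2 < l.length ∧ l.getD i ' ' = 'b' ∧ l.getD (i+1) ' ' = 'e' ∧ l.getD (i+2) ' ' = 'e' then 1 else 0
-- indicator: "eeb" occupies positions i, i+1, i+2 of l
def pvEebAt (l : List Char) (i : Nat) : Int :=
  if i + 2 < l.length ∧ l.getD i ' ' = 'e' ∧ l.getD (i+1) ' ' = 'e' ∧ l.getD (i+2) ' ' = 'b' then 1 else 0
-- indicator: "eeb" ENDS at position j of l (A's LEFT/UP probe anchored at the 'b')
def pvEebEnd (l : List Char) (j : Nat) : Int :=
  if 2 ≤ j ∧ j < l.length ∧ l.getD j ' ' = 'b' ∧ l.getD (j-1) ' ' = 'e' ∧ l.getD (j-2) ' ' = 'e' then 1 else 0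
-- number of 3-char windows of l equal to "bee" or "eeb"
def pvLC (l : List Char) : Int := ∑ i ∈ Finset.range l.length, (pvBeeAt l i + pvEebAt l i)
-- column j of a char grid
def pvColL (g : List (List Char)) (j : Nat) : List Char := g.map (fun r => r.getD j ' ')
-- A's four direction probes at one cell, as one Int
def pvCellT (hive : List String) (rows cols : Int) (i j : Int) : Int :=
  (if pvCountBees hive rows cols "UP" i j then 1 else 0) +
    (if pvCountBees hive rows cols "DOWN" i j then 1 else 0) +
    (if pvCountBees hive rows cols "LEFT" i j then 1 else 0) +
    (if pvCountBees hive rows cols "RIGHT" i j then 1 else 0)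

theorem pvListRangeSum (f : Nat → Int) (n : Nat) :
    ((List.range n).map f).sum = ∑ i ∈ Finset.range n, f i := by
  induction n with
  | zero => simp
  | succ m ih => simp [List.range_succ, Finset.sum_range_succ, ih]

theorem pvSumGetD {α : Type} (xs : List α) (d : α) (f : α → Int) :
    (xs.map f).sum = ∑ i ∈ Finset.range xs.length, f (xs.getD i d) := by
  induction xs with
  | nil => simp
  | cons x t ih =>
    simp only [List.map_cons, List.sum_cons, List.length_cons,
      Finset.sum_range_succ' (fun i => f ((x :: t).getD i d)) t.length]
    simp [ih, add_comm]

theorem pvShift (l : List Char) :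
    ∑ j ∈ Finset.range l.length, pvEebEnd l j = ∑ i ∈ Finset.range l.length, pvEebAt l i := by
  rcases Nat.lt_or_ge l.length 2 with hn | hn
  · rw [Finset.sum_eq_zero, Finset.sum_eq_zero] <;> intro i hi <;> rw [Finset.mem_range] at hi
    · simp only [pvEebAt]; rw [if_neg]; rintro ⟨h1, -⟩; omega
    · simp only [pvEebEnd]; rw [if_neg]; rintro ⟨h1, -⟩; omega
  · obtain ⟨m, hm⟩ : ∃ m, l.length = m + 2 := ⟨l.length - 2, by omega⟩
    rw [hm, Finset.sum_range_succ' _ (m+1), Finset.sum_range_succ' _ m,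
      Finset.sum_range_succ (fun i => pvEebAt l i) (m+1), Finset.sum_range_succ (fun i => pvEebAt l i) m]
    have e0 : pvEebEnd l 0 = 0 := by simp [pvEebEnd]
    have e1 : pvEebEnd l 1 = 0 := by simp only [pvEebEnd]; rw [if_neg]; rintro ⟨h1, -⟩; omega
    have a1 : pvEebAt l m = 0 := by simp only [pvEebAt]; rw [if_neg]; rintro ⟨h1, -⟩; omega
    have a2 : pvEebAt l (m+1) = 0 := by simp only [pvEebAt]; rw [if_neg]; rintro ⟨h1, -⟩; omega
    rw [e0, e1, a1, a2]
    simp only [add_zero]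
    apply Finset.sum_congr rfl
    intro k hk
    simp only [pvEebEnd, pvEebAt, show k+1+1 = k+2 from rfl, show k+1+1-1 = k+1 from rfl,
      show k+1+1-2 = k from rfl]
    apply if_congr _ rfl rfl
    constructor
    · rintro ⟨-, h2, h3, h4, h5⟩; exact ⟨h2, h5, h4, h3⟩
    · rintro ⟨h2, h3, h4, h5⟩; exact ⟨by omega, h2, h5, h4, h3⟩

theorem pvRowSum (l : List Char) :
    ∑ j ∈ Finset.range l.length, (pvBeeAt l j + pvEebEnd l j) = pvLC l := by
  rw [Finset.sum_add_distrib, pvShift, pvLC, Finset.sum_add_distrib]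

theorem pvTriple (l : List Char) (k : Nat) (a b c : Char) :
    (l.drop k).take 3 = [a, b, c] ↔
      k + 2 < l.length ∧ l.getD k ' ' = a ∧ l.getD (k+1) ' ' = b ∧ l.getD (k+2) ' ' = c := by
  have hget : ∀ m : Nat, m < 3 → ((l.drop k).take 3)[m]? = l[k+m]? := by
    intro m hm
    rw [List.getElem?_take_of_lt hm, List.getElem?_drop]
  constructor
  · intro h
    have hlen : ((l.drop k).take 3).length = 3 := by rw [h]; rfl
    have hl : k + 2 < l.length := by
      rw [List.length_take, List.length_drop] at hlen; omega
    refine ⟨hl, ?_, ?_, ?_⟩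
    · have := hget 0 (by omega); rw [h] at this
      simp at this; rw [List.getD_eq_getElem?_getD, ← this]; rfl
    · have := hget 1 (by omega); rw [h] at this
      simp at this; rw [List.getD_eq_getElem?_getD, ← this]; rfl
    · have := hget 2 (by omega); rw [h] at this
      simp at this; rw [List.getD_eq_getElem?_getD, ← this]; rfl
  · rintro ⟨hl, ha, hb, hc⟩
    apply List.ext_getElem?
    intro m
    rcases Nat.lt_or_ge m 3 with hm | hm
    · rw [hget m hm]
      interval_cases m
      · rw [show [a,b,c][0]? = some a from rfl, List.getElem?_eq_getElem (by omega)]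
        rw [List.getD_eq_getElem?_getD, List.getElem?_eq_getElem (by omega : k < l.length)] at ha
        simp at ha; simp [ha]
      · rw [show [a,b,c][1]? = some b from rfl, List.getElem?_eq_getElem (by omega)]
        rw [List.getD_eq_getElem?_getD, List.getElem?_eq_getElem (by omega : k+1 < l.length)] at hb
        simp at hb; simp [hb]
      · rw [show [a,b,c][2]? = some c from rfl, List.getElem?_eq_getElem (by omega)]
        rw [List.getD_eq_getElem?_getD, List.getElem?_eq_getElem (by omega : k+2 < l.length)] at hc
        simp at hc; simp [hc]
    · rw [List.getElem?_eq_none (by simp [List.length_take, List.length_drop]; omega),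
        List.getElem?_eq_none (by simp; omega)]

theorem pvWindow (l : List Char) (k : Nat) :
    (if (l.drop k).take 3 = ['b','e','e'] ∨ (l.drop k).take 3 = ['e','e','b'] then (1:Int) else 0)
      = pvBeeAt l k + pvEebAt l k := by
  simp only [pvBeeAt, pvEebAt, ← pvTriple]
  by_cases h1 : (l.drop k).take 3 = ['b','e','e'] <;> by_cases h2 : (l.drop k).take 3 = ['e','e','b']
  · rw [h1] at h2; cases h2
  · rw [if_pos (Or.inl h1), if_pos h1, if_neg h2]; norm_num
  · rw [if_pos (Or.inr h2), if_neg h1, if_pos h2]; norm_num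
  · rw [if_neg (by tauto), if_neg h1, if_neg h2]; norm_num

theorem pvLineFold (l : List Char) (acc : Int) :
    (PySem.List.pyRange 0 (PySem.Chars.len l) 1).foldl (fun acc2 i =>
        if PySem.List.slice l (some i) (some (i + 3)) = ['b', 'e', 'e'] ∨
            PySem.List.slice l (some i) (some (i + 3)) = ['e', 'e', 'b'] then acc2 + 1
        else acc2) acc = acc + pvLC l := by
  rw [show PySem.Chars.len l = (l.length : Int) from by simp, PySem.List.pyRange_one]
  rw [show ((l.length : Int) - 0).toNat = l.length from by omega]
  rw [List.foldl_map]
  rw [PySem.List.foldl_congr_mem _ _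
    (fun acc2 (k : Nat) => acc2 + (pvBeeAt l k + pvEebAt l k)) _ ?_]
  · rw [PySem.List.foldl_add, pvListRangeSum]; rfl
  · intro acc2 k hk
    have hc : (0 : Int) + (k : Int) = ((k : Nat) : Int) := by omega
    rw [hc, show ((k : Nat) : Int) + 3 = ((k : Nat) : Int) + ((3:Nat) : Int) from by norm_num,
      PySem.List.slice_natCast_add]
    show _ = acc2 + (pvBeeAt l k + pvEebAt l k)
    rw [← pvWindow l k]
    split_ifs <;> ring

theorem pvCell_eq (hive : List String) (w : Nat) (hrect : ∀ s ∈ hive, w ≤ s.toList.length)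
    (ki kj : Nat) (hki : ki < hive.length) (hkj : kj < w) (c : Char) :
    pvCellB hive (ki : Int) (kj : Int) c
      = decide (((hive.map (fun s => s.toList.take w)).getD ki []).getD kj ' ' = c) := by
  have hlen : w ≤ (hive[ki]).toList.length := hrect _ (List.getElem_mem hki)
  have hg : (hive.map (fun s => s.toList.take w)).getD ki [] = (hive[ki]).toList.take w := by
    rw [List.getD_eq_getElem?_getD, List.getElem?_map, List.getElem?_eq_getElem hki]; rfl
  have hchar : ((hive[ki]).toList.take w).getD kj ' ' = (hive[ki]).toList[kj]'(by omega) := by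
    rw [List.getD_eq_getElem?_getD, List.getElem?_take_of_lt hkj, List.getElem?_eq_getElem (by omega)]; rfl
  rw [pvCellB, PySem.List.pyGet?_natCast, List.getElem?_eq_getElem hki, hg, hchar]
  show (PySem.Str.pyGet? (hive[ki]) (kj : Nat) == some c) = _
  rw [PySem.Str.pyGet?_natCast, List.getElem?_eq_getElem (by omega)]
  by_cases h : hive[ki].toList[kj] = c
  · simp [h]
  · simp [h, beq_eq_false_iff_ne.mpr h]

theorem pvCB_false (hive : List String) (rows cols : Int) (dir : String) (i j : Int)
    (hb : pvCellB hive i j 'b' = false) : pvCountBees hive rows cols dir i j = false := by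
  simp [pvCountBees, hb]

theorem pvRight (hive : List String) (w : Nat) (hrect : ∀ s ∈ hive, w ≤ s.toList.length)
    (ki kj : Nat) (hki : ki < hive.length) (hkj : kj < w) :
    (if pvCountBees hive (hive.length : Int) (w : Int) "RIGHT" (ki : Int) (kj : Int) then (1:Int) else 0)
      = pvBeeAt ((hive.map (fun s => s.toList.take w)).getD ki []) kj := by
  have hd : (((((PySem.Dict.empty : PySem.Dict String (Int × Int)).insert "UP" (-1, 0)).insert "DOWN" (1, 0)).insert "LEFT" (0, -1)).insert "RIGHT" (0, 1)).getD "RIGHT" (0, 0) = (0, 1) := by decide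
  have hlen : ((hive.map (fun s => s.toList.take w)).getD ki []).length = w := by
    rw [List.getD_eq_getElem?_getD, List.getElem?_map, List.getElem?_eq_getElem hki]
    have := hrect _ (List.getElem_mem hki)
    simp only [Option.map_some, Option.getD_some, List.length_take]
    omega
  by_cases hb : kj + 2 < w
  · have h1 : kj + 1 < w := by omega
    have e1 : (kj:Int) + 1 = ((kj+1 : Nat) : Int) := by push_cast; ring
    have e2 : (kj:Int) + 2 = ((kj+2 : Nat) : Int) := by push_cast; ring
    simp only [pvCountBees, hd]
    norm_num
    simp only [e1, e2, pvCell_eq hive w hrect ki kj hki hkj 'b',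
      pvCell_eq hive w hrect ki (kj+1) hki h1 'e', pvCell_eq hive w hrect ki (kj+2) hki hb 'e',
      decide_eq_true_eq, pvBeeAt, List.getD_eq_getElem?_getD, List.getElem?_map] at hlen ⊢
    refine if_congr ?_ rfl rfl
    constructor
    · rintro ⟨-, ⟨c1, c2⟩, c3⟩; exact ⟨by omega, c1, c2, c3⟩
    · rintro ⟨-, c1, c2, c3⟩
      exact ⟨⟨hki, by omega, by exact_mod_cast hb⟩, ⟨c1, c2⟩, c3⟩
  · simp only [pvCountBees, hd]
    norm_num
    rw [if_neg (by rintro ⟨⟨-, -, c⟩, -⟩; omega)]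
    simp only [pvBeeAt, List.getD_eq_getElem?_getD, List.getElem?_map] at hlen ⊢
    rw [if_neg (by rintro ⟨c0, -⟩; omega)]

theorem pvLeft (hive : List String) (w : Nat) (hrect : ∀ s ∈ hive, w ≤ s.toList.length)
    (ki kj : Nat) (hki : ki < hive.length) (hkj : kj < w) :
    (if pvCountBees hive (hive.length : Int) (w : Int) "LEFT" (ki : Int) (kj : Int) then (1:Int) else 0)
      = pvEebEnd ((hive.map (fun s => s.toList.take w)).getD ki []) kj := by
  have hd : (((((PySem.Dict.empty : PySem.Dict String (Int × Int)).insert "UP" (-1, 0)).insert "DOWN" (1, 0)).insert "LEFT" (0, -1)).insert "RIGHT" (0, 1)).getD "LEFT" (0, 0) = (0, -1) := by decide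
  have hlen : ((hive.map (fun s => s.toList.take w)).getD ki []).length = w := by
    rw [List.getD_eq_getElem?_getD, List.getElem?_map, List.getElem?_eq_getElem hki]
    have := hrect _ (List.getElem_mem hki)
    simp only [Option.map_some, Option.getD_some, List.length_take]
    omega
  by_cases hb : 2 ≤ kj
  · have h1 : kj - 1 < w := by omega
    have h2 : kj - 2 < w := by omega
    have e1 : (kj:Int) + -1 = ((kj-1 : Nat) : Int) := by omega
    have e2 : (kj:Int) + -2 = ((kj-2 : Nat) : Int) := by omega
    simp only [pvCountBees, hd]
    norm_num
    have hlen0 := hlen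
    simp only [e1, e2, pvCell_eq hive w hrect ki kj hki hkj 'b',
      pvCell_eq hive w hrect ki (kj-1) hki h1 'e', pvCell_eq hive w hrect ki (kj-2) hki h2 'e',
      decide_eq_true_eq, pvEebEnd, List.getD_eq_getElem?_getD, List.getElem?_map] at hlen ⊢
    refine if_congr ?_ rfl rfl
    constructor
    · rintro ⟨-, ⟨c1, c2⟩, c3⟩; exact ⟨hb, by omega, c1, c2, c3⟩
    · rintro ⟨-, -, c1, c2, c3⟩
      exact ⟨by omega, ⟨c1, c2⟩, c3⟩
  · simp only [pvCountBees, hd]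
    norm_num
    rw [if_neg (by rintro ⟨⟨-, c, -⟩, -⟩; exact hb c)]
    simp only [pvEebEnd, List.getD_eq_getElem?_getD, List.getElem?_map] at hlen ⊢
    rw [if_neg (by rintro ⟨c0, -⟩; exact hb c0)]

theorem pvDown (hive : List String) (w : Nat) (hrect : ∀ s ∈ hive, w ≤ s.toList.length)
    (ki kj : Nat) (hki : ki < hive.length) (hkj : kj < w) :
    (if pvCountBees hive (hive.length : Int) (w : Int) "DOWN" (ki : Int) (kj : Int) then (1:Int) else 0)
      = pvBeeAt (pvColL (hive.map (fun s => s.toList.take w)) kj) ki := by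
  have hd : (((((PySem.Dict.empty : PySem.Dict String (Int × Int)).insert "UP" (-1, 0)).insert "DOWN" (1, 0)).insert "LEFT" (0, -1)).insert "RIGHT" (0, 1)).getD "DOWN" (0, 0) = (1, 0) := by decide
  have hcl : (pvColL (hive.map (fun s => s.toList.take w)) kj).length = hive.length := by simp [pvColL]
  have hcol : ∀ i : Nat, i < hive.length →
      (pvColL (hive.map (fun s => s.toList.take w)) kj).getD i ' ' = ((hive.map (fun s => s.toList.take w)).getD i []).getD kj ' ' := by
    intro i hi
    simp only [pvColL, List.getD_eq_getElem?_getD, List.getElem?_map, List.getElem?_eq_getElem hi]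
    rfl
  by_cases hb : ki + 2 < hive.length
  · have h1 : ki + 1 < hive.length := by omega
    have e1 : (ki:Int) + 1 = ((ki+1 : Nat) : Int) := by omega
    have e2 : (ki:Int) + 2 = ((ki+2 : Nat) : Int) := by omega
    simp only [pvCountBees, hd]
    norm_num
    simp only [pvBeeAt, hcl, hcol ki hki, hcol (ki+1) h1, hcol (ki+2) hb]
    simp only [e1, e2, pvCell_eq hive w hrect ki kj hki hkj 'b',
      pvCell_eq hive w hrect (ki+1) kj h1 hkj 'e', pvCell_eq hive w hrect (ki+2) kj hb hkj 'e',
      decide_eq_true_eq, List.getD_eq_getElem?_getD, List.getElem?_map]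
    simp only [Nat.cast_add]
    refine if_congr ?_ rfl rfl
    constructor
    · rintro ⟨-, ⟨c1, c2⟩, c3⟩; exact ⟨hb, c1, c2, c3⟩
    · rintro ⟨-, c1, c2, c3⟩
      exact ⟨by omega, ⟨c1, c2⟩, c3⟩
  · simp only [pvCountBees, hd]
    norm_num
    rw [if_neg (by rintro ⟨⟨-, c⟩, -⟩; omega)]
    simp only [pvBeeAt, hcl]
    rw [if_neg (by rintro ⟨c0, -⟩; omega)]

theorem pvUp (hive : List String) (w : Nat) (hrect : ∀ s ∈ hive, w ≤ s.toList.length)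
    (ki kj : Nat) (hki : ki < hive.length) (hkj : kj < w) :
    (if pvCountBees hive (hive.length : Int) (w : Int) "UP" (ki : Int) (kj : Int) then (1:Int) else 0)
      = pvEebEnd (pvColL (hive.map (fun s => s.toList.take w)) kj) ki := by
  have hd : (((((PySem.Dict.empty : PySem.Dict String (Int × Int)).insert "UP" (-1, 0)).insert "DOWN" (1, 0)).insert "LEFT" (0, -1)).insert "RIGHT" (0, 1)).getD "UP" (0, 0) = (-1, 0) := by decide
  have hcl : (pvColL (hive.map (fun s => s.toList.take w)) kj).length = hive.length := by simp [pvColL]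
  have hcol : ∀ i : Nat, i < hive.length →
      (pvColL (hive.map (fun s => s.toList.take w)) kj).getD i ' ' = ((hive.map (fun s => s.toList.take w)).getD i []).getD kj ' ' := by
    intro i hi
    simp only [pvColL, List.getD_eq_getElem?_getD, List.getElem?_map, List.getElem?_eq_getElem hi]
    rfl
  by_cases hb : 2 ≤ ki
  · have h1 : ki - 1 < hive.length := by omega
    have h2 : ki - 2 < hive.length := by omega
    have e1 : (ki:Int) + -1 = ((ki-1 : Nat) : Int) := by omega
    have e2 : (ki:Int) + -2 = ((ki-2 : Nat) : Int) := by omega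
    simp only [pvCountBees, hd]
    norm_num
    simp only [pvEebEnd, hcl, hcol ki hki, hcol (ki-1) h1, hcol (ki-2) h2]
    simp only [e1, e2, pvCell_eq hive w hrect ki kj hki hkj 'b',
      pvCell_eq hive w hrect (ki-1) kj h1 hkj 'e', pvCell_eq hive w hrect (ki-2) kj h2 hkj 'e',
      decide_eq_true_eq, List.getD_eq_getElem?_getD, List.getElem?_map]
    refine if_congr ?_ rfl rfl
    constructor
    · rintro ⟨-, ⟨c1, c2⟩, c3⟩; exact ⟨hb, by omega, c1, c2, c3⟩
    · rintro ⟨-, -, c1, c2, c3⟩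
      exact ⟨by omega, ⟨c1, c2⟩, c3⟩
  · simp only [pvCountBees, hd]
    norm_num
    rw [if_neg (by rintro ⟨⟨c, -⟩, -⟩; exact hb c)]
    simp only [pvEebEnd, hcl]
    rw [if_neg (by rintro ⟨c0, -⟩; exact hb c0)]


theorem pvMain (h : String) (t : List String) (hh : h ≠ "")
    (hrect : ∀ s ∈ (h :: t), h.toList.length ≤ s.toList.length) :
    how_many_bees (h :: t) = how_many_bees_alt (h :: t) := by
  have hguard : ¬((h :: t) = [] ∨ (h :: t).headD "" = "") := by simp [hh]
  have hlenStr : PySem.Str.len h = (h.toList.length : Int) := by simp [PySem.Str.len]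
  have hrowlen : ∀ ki : Nat, ki < (h :: t).length →
      (((h :: t).map (fun s => s.toList.take h.toList.length)).getD ki []).length = h.toList.length := by
    intro ki hki
    rw [List.getD_eq_getElem?_getD, List.getElem?_map, List.getElem?_eq_getElem hki]
    have := hrect _ (List.getElem_mem hki)
    simp only [Option.map_some, Option.getD_some, List.length_take]
    omega
  have hcollen : ∀ kj : Nat, (pvColL ((h :: t).map (fun s => s.toList.take h.toList.length)) kj).length = (h :: t).length := by
    intro kj; simp [pvColL]
  -- the inner column loop of A, as a sum over the row
  have hInner : ∀ (ki : Nat), ki < (h :: t).length → ∀ acc : Int,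
      (PySem.List.pyRange 0 ((h.toList.length : Nat) : Int) 1).foldl (fun acc2 j =>
        if pvCellB (h :: t) (ki : Int) j 'b' then
          (["UP", "DOWN", "LEFT", "RIGHT"]).foldl (fun acc3 dir =>
            acc3 + (if pvCountBees (h :: t) (((h :: t).length : Nat) : Int) ((h.toList.length : Nat) : Int) dir (ki : Int) j then 1 else 0)) acc2
        else acc2) acc
      = acc + ∑ kj ∈ Finset.range h.toList.length,
          pvCellT (h :: t) (((h :: t).length : Nat) : Int) ((h.toList.length : Nat) : Int) (ki : Int) (kj : Int) := by
    intro ki hki acc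
    rw [PySem.List.pyRange_one, show (((h.toList.length : Nat) : Int) - 0).toNat = h.toList.length from by omega,
      List.foldl_map]
    rw [PySem.List.foldl_congr_mem _ _
      (fun acc2 (kj : Nat) => acc2 + pvCellT (h :: t) (((h :: t).length : Nat) : Int) ((h.toList.length : Nat) : Int) (ki : Int) (kj : Int)) _ ?_]
    · rw [PySem.List.foldl_add, pvListRangeSum]
    · intro acc2 kj hkj
      rw [show (0 : Int) + (kj : Int) = ((kj : Nat) : Int) from by omega]
      by_cases hb : pvCellB (h :: t) (ki : Int) (kj : Int) 'b'
      · rw [if_pos hb]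
        simp only [List.foldl]
        show acc2 + _ + _ + _ + _ = _
        rw [pvCellT]; ring
      · rw [if_neg hb]
        have hb' : pvCellB (h :: t) (ki : Int) (kj : Int) 'b' = false := by
          simpa using hb
        show acc2 = acc2 + _
        rw [pvCellT, pvCB_false _ _ _ _ _ _ hb', pvCB_false _ _ _ _ _ _ hb',
          pvCB_false _ _ _ _ _ _ hb', pvCB_false _ _ _ _ _ _ hb']
        norm_num
  -- A as a double sum of per-cell probes
  have hA : how_many_bees (h :: t) = ∑ ki ∈ Finset.range (h :: t).length,
      ∑ kj ∈ Finset.range h.toList.length,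
        pvCellT (h :: t) (((h :: t).length : Nat) : Int) ((h.toList.length : Nat) : Int) (ki : Int) (kj : Int) := by
    unfold how_many_bees
    rw [if_neg hguard]
    simp only [List.headD_cons, hlenStr]
    rw [PySem.List.foldl_congr_mem _ _
      (fun acc (i : Int) => acc + ∑ kj ∈ Finset.range h.toList.length,
        pvCellT (h :: t) (((h :: t).length : Nat) : Int) ((h.toList.length : Nat) : Int) i (kj : Int)) _ ?_]
    · rw [PySem.List.foldl_add, PySem.List.pyRange_one,
        show ((((h :: t).length : Nat) : Int) - 0).toNat = (h :: t).length from by omega,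
        List.map_map, pvListRangeSum, zero_add]
      apply Finset.sum_congr rfl
      intro ki _
      show (∑ kj ∈ Finset.range h.toList.length, pvCellT (h :: t) _ _ ((0 : Int) + (ki : Int)) _) = _
      rw [show (0 : Int) + (ki : Int) = ((ki : Nat) : Int) from by omega]
    · intro acc i hi
      rw [PySem.List.mem_pyRange_one] at hi
      rw [show i = ((i.toNat : Nat) : Int) from by omega]
      exact hInner i.toNat (by omega) acc
  -- B as row-line counts plus column-line counts
  have hfold : ∀ (ls : List (List Char)) (acc : Int),
      ls.foldl (fun acc line =>
        (PySem.List.pyRange 0 (PySem.Chars.len line) 1).foldl (fun acc2 i =>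
          if PySem.List.slice line (some i) (some (i + 3)) = ['b', 'e', 'e'] ∨
              PySem.List.slice line (some i) (some (i + 3)) = ['e', 'e', 'b'] then acc2 + 1
          else acc2) acc) acc = acc + (ls.map pvLC).sum := by
    intro ls acc
    rw [PySem.List.foldl_congr_mem _ _ (fun acc2 line => acc2 + pvLC line) _
      (by intro a l _; exact pvLineFold l a), PySem.List.foldl_add]
  have hcolfun : ∀ kj : Nat, kj < h.toList.length →
      ((h :: t).map (fun row => PySem.List.pyGetD row.toList ((0 : Int) + (kj : Int)) ' '))
        = pvColL ((h :: t).map (fun s => s.toList.take h.toList.length)) kj := by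
    intro kj hkj
    simp only [zero_add, PySem.List.pyGetD_natCast, pvColL, List.map_map]
    apply List.map_congr_left
    intro row _
    simp only [Function.comp]
    rw [List.getD_eq_getElem?_getD, List.getD_eq_getElem?_getD, List.getElem?_take_of_lt hkj]
  have hB : how_many_bees_alt (h :: t)
      = (∑ ki ∈ Finset.range (h :: t).length, pvLC (((h :: t).map (fun s => s.toList.take h.toList.length)).getD ki []))
        + ∑ kj ∈ Finset.range h.toList.length, pvLC (pvColL ((h :: t).map (fun s => s.toList.take h.toList.length)) kj) := by
    unfold how_many_bees_alt
    rw [if_neg hguard]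
    simp only [List.headD_cons, hlenStr]
    rw [show (fun row : String => PySem.List.slice row.toList none (some ((h.toList.length : Nat) : Int)))
        = (fun s : String => s.toList.take h.toList.length) from
      funext fun row => by rw [PySem.List.slice_to_natCast]]
    rw [List.foldl_append, hfold, hfold, zero_add]
    congr 1
    · rw [pvSumGetD _ ([] : List Char), List.length_map]
    · rw [PySem.List.pyRange_one, show ((((h.toList.length : Nat)) : Int) - 0).toNat = h.toList.length from by omega]
      rw [List.map_map, List.map_map, pvListRangeSum]
      apply Finset.sum_congr rfl
      intro kj hkj
      rw [Finset.mem_range] at hkj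
      show pvLC ((h :: t).map (fun row => PySem.List.pyGetD row.toList ((0 : Int) + (kj : Int)) ' ')) = _
      rw [hcolfun kj hkj]
  -- per-cell: A's four probes are the horizontal + vertical window indicators
  have hcell : ∀ ki ∈ Finset.range (h :: t).length, ∀ kj ∈ Finset.range h.toList.length,
      pvCellT (h :: t) (((h :: t).length : Nat) : Int) ((h.toList.length : Nat) : Int) (ki : Int) (kj : Int)
        = (pvBeeAt (((h :: t).map (fun s => s.toList.take h.toList.length)).getD ki []) kj
            + pvEebEnd (((h :: t).map (fun s => s.toList.take h.toList.length)).getD ki []) kj)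
          + (pvBeeAt (pvColL ((h :: t).map (fun s => s.toList.take h.toList.length)) kj) ki
            + pvEebEnd (pvColL ((h :: t).map (fun s => s.toList.take h.toList.length)) kj) ki) := by
    intro ki hki kj hkj
    rw [Finset.mem_range] at hki hkj
    rw [pvCellT, pvUp (h :: t) h.toList.length hrect ki kj hki hkj,
      pvDown (h :: t) h.toList.length hrect ki kj hki hkj,
      pvLeft (h :: t) h.toList.length hrect ki kj hki hkj,
      pvRight (h :: t) h.toList.length hrect ki kj hki hkj]
    ring
  rw [hA, hB]
  rw [Finset.sum_congr rfl (fun ki hki => Finset.sum_congr rfl (fun kj hkj => hcell ki hki kj hkj))]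
  rw [Finset.sum_congr rfl (fun ki hki => Finset.sum_add_distrib), Finset.sum_add_distrib]
  congr 1
  · apply Finset.sum_congr rfl
    intro ki hki
    rw [Finset.mem_range] at hki
    set l := ((h :: t).map (fun s => s.toList.take h.toList.length)).getD ki [] with hl
    rw [show h.toList.length = l.length from (hrowlen ki hki).symm]
    exact pvRowSum l
  · rw [Finset.sum_comm]
    apply Finset.sum_congr rfl
    intro kj _
    set c := pvColL ((h :: t).map (fun s => s.toList.take h.toList.length)) kj with hc
    rw [show (h :: t).length = c.length from (hcollen kj).symm]
    exact pvRowSum c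

-- ===== VERDICT (by name: the statement is the Claim_ definition above) =====
theorem how_many_bees_spec : Claim_equal_how_many_bees := by
  intro hive _hdom hpre
  unfold Spec_how_many_bees
  cases hive with
  | nil => simp [how_many_bees, how_many_bees_alt]
  | cons h t =>
    by_cases hh : h = ""
    · simp [how_many_bees, how_many_bees_alt, hh]
    · refine pvMain h t hh ?_
      intro s hs
      have := hpre s hs
      simpa using this
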